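-- pv_equiv track=rewrite | github.com/AdamZhouSE/pythonHomework | Code/CodeRecords/2495/59308/252566.py | my_find
-- ===== SOURCE A (Python) =====
-- def my_find(alpha_list):
--     len_ = 0
--     index = 0
--     for i in range(len(alpha_list)):
--         if len(alpha_list[i]) > len_:
--             len_ = len(alpha_list[i])
--             index = i
--         elif len(alpha_list[i]) == len_:
--             if alpha_list[i] < alpha_list[index]:
--                 index = i
--     return alpha_list[index]
-- ===== SOURCE B (Python) =====
-- def my_find(alpha_list):
--     return sorted(alpha_list, key=lambda s: (-len(s), s))[0]
-- ===== Notes on version B (the rewrite author's own statement) =====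
-- stated objective: simpler
-- what changed: Replaced the manual index-tracking scan with a one-line sort by the compound key (-len(s), s) and taking the first element.
import Mathlib
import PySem

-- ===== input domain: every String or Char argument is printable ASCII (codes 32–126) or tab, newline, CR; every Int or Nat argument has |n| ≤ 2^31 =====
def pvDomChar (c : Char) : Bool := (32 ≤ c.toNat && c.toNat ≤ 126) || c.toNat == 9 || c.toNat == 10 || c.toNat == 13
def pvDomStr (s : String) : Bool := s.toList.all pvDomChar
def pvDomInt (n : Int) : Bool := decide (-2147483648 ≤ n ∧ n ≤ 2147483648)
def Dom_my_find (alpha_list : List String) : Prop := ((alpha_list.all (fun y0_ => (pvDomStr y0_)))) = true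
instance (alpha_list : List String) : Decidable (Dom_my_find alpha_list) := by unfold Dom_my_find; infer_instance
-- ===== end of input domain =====

-- B replaces A's manual best-so-far index scan by sorting on the compound key (-len(s), s)
-- and taking the first element (objective: simpler). Return-value equivalence on nonempty lists.

-- ===== PORT A =====
def my_find (alpha_list : List String) : String :=
  let st := (PySem.List.pyRange 0 (PySem.List.len alpha_list) 1).foldl
    (fun (st : Int × Int) i =>
      if PySem.Str.len (PySem.List.pyGetD alpha_list i "") > st.1 then
        (PySem.Str.len (PySem.List.pyGetD alpha_list i ""), i)
      else if PySem.Str.len (PySem.List.pyGetD alpha_list i "") = st.1 then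
        if PySem.List.pyGetD alpha_list i "" < PySem.List.pyGetD alpha_list st.2 "" then
          (st.1, i)
        else st
      else st) (0, 0)
  PySem.List.pyGetD alpha_list st.2 ""

-- ===== PORT B =====
-- sorted(alpha_list, key=lambda s: (-len(s), s))[0]; on [] Python raises IndexError
-- (excluded by Pre_), headI's "" default is never reached inside Pre_.
def my_find_alt (alpha_list : List String) : String :=
  (PySem.List.sorted2 alpha_list (fun s => -(PySem.Str.len s)) (fun s => s) false).headI

-- ===== PRECONDITION & SPEC =====
-- A (and B) raise IndexError on the empty list; that is the only excluded input.
def Pre_my_find (alpha_list : List String) : Prop := alpha_list ≠ []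
instance (alpha_list : List String) : Decidable (Pre_my_find alpha_list) := by unfold Pre_my_find; infer_instance
def pvWitness_my_find : List String := (["ab", "b", "cd"])

def Spec_my_find (alpha_list : List String) (out : String) : Prop := out = my_find_alt alpha_list
instance (alpha_list : List String) (out : String) : Decidable (Spec_my_find alpha_list out) := by unfold Spec_my_find; infer_instance

-- ===== CLAIM (what is proved, stated in full; the proofs are below) =====
def Claim_equal_my_find : Prop := ∀ (alpha_list : List String), Dom_my_find alpha_list → Pre_my_find alpha_list → Spec_my_find alpha_list (my_find alpha_list)

-- ===== LEMMAS AND PROOFS =====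

-- The compound sort key (-len s, s), ordered lexicographically, as Python compares tuples.
def pkey (s : String) : Lex (Int × String) := toLex (-(PySem.Str.len s), s)

theorem pkey_inj {a b : String} (h : pkey a = pkey b) : a = b := by
  have := congrArg (fun x => (ofLex x).2) h
  simpa [pkey] using this

theorem pkey_lt_iff (a b : String) :
    pkey a < pkey b ↔ (PySem.Str.len b < PySem.Str.len a ∨ (PySem.Str.len a = PySem.Str.len b ∧ a < b)) := by
  simp [pkey, Prod.Lex.lt_iff, neg_lt_neg_iff, neg_inj]

theorem pkey_le_iff (a b : String) :
    pkey a ≤ pkey b ↔ ¬ (PySem.Str.len a < PySem.Str.len b ∨ (PySem.Str.len b = PySem.Str.len a ∧ b < a)) := by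
  rw [← not_lt, pkey_lt_iff]

theorem pkey_lt_iff' (a b : String) :
    pkey a < pkey b ↔
      ((-(PySem.Str.len a) < -(PySem.Str.len b)) ∨
        (¬ (-(PySem.Str.len b) < -(PySem.Str.len a)) ∧ a < b)) := by
  rw [pkey_lt_iff]
  constructor
  · rintro (h | ⟨h1, h2⟩)
    · exact Or.inl (by omega)
    · exact Or.inr ⟨by omega, h2⟩
  · rintro (h | ⟨h1, h2⟩)
    · exact Or.inl (by omega)
    · rcases lt_or_eq_of_le (by omega : PySem.Str.len b ≤ PySem.Str.len a) with h3 | h3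
      · exact Or.inl h3
      · exact Or.inr ⟨h3.symm, h2⟩

-- sorted2 with our keys is the insertBy fold with the strict order on pkey.
theorem sorted2_eq_fold (xs : List String) :
    PySem.List.sorted2 xs (fun s => -(PySem.Str.len s)) (fun s => s) false
      = xs.foldl (fun acc x => PySem.List.insertBy (fun a b => decide (pkey a < pkey b)) x acc) [] := by
  unfold PySem.List.sorted2
  simp only [Bool.false_eq_true, if_false]
  congr 1
  funext acc x
  congr 1
  funext a b
  conv_rhs => rw [decide_eq_decide.mpr (pkey_lt_iff' a b)]
  by_cases h1 : -(PySem.Str.len a) < -(PySem.Str.len b) <;>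
    by_cases h2 : -(PySem.Str.len b) < -(PySem.Str.len a) <;>
    by_cases h3 : a < b <;>
    simp [*, ← decide_not, not_lt]

theorem fold_insertBy_pairwise (xs acc : List String)
    (h : acc.Pairwise (fun a b => pkey a ≤ pkey b)) :
    (xs.foldl (fun acc x => PySem.List.insertBy (fun a b => decide (pkey a < pkey b)) x acc) acc).Pairwise
      (fun a b => pkey a ≤ pkey b) := by
  induction xs generalizing acc with
  | nil => simpa using h
  | cons x t ih =>
    simp only [List.foldl_cons]
    exact ih _ (PySem.List.insertBy_pairwise_le pkey x acc h)

theorem B_min (xs : List String) (hne : xs ≠ []) :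
    my_find_alt xs ∈ xs ∧ ∀ y ∈ xs, pkey (my_find_alt xs) ≤ pkey y := by
  have hperm := PySem.List.sorted2_perm xs (fun s => -(PySem.Str.len s)) (fun s => s) false
  have hpw : (PySem.List.sorted2 xs (fun s => -(PySem.Str.len s)) (fun s => s) false).Pairwise
      (fun a b => pkey a ≤ pkey b) := by
    rw [sorted2_eq_fold]
    exact fold_insertBy_pairwise xs [] (by simp)
  rcases hs : PySem.List.sorted2 xs (fun s => -(PySem.Str.len s)) (fun s => s) false with _ | ⟨m, t⟩
  · rw [hs] at hperm
    exact absurd hperm.symm.eq_nil hne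
  · rw [hs] at hperm hpw
    have hm : my_find_alt xs = m := by unfold my_find_alt; rw [hs]; rfl
    rw [hm]
    constructor
    · exact hperm.mem_iff.mp (List.mem_cons_self ..)
    · intro y hy
      rcases List.mem_cons.mp (hperm.mem_iff.mpr hy) with h | h
      · exact le_of_eq (by rw [h])
      · exact (List.pairwise_cons.mp hpw).1 y h

-- A's loop invariant: after the first m iterations the tracked index points at the
-- pkey-minimal element of the first m entries and len_ caches its length.
theorem A_loop (xs : List String) (m : Nat) (h1 : 1 ≤ m) (h2 : m ≤ xs.length) :
    let st := (PySem.List.pyRange 0 (m : Int) 1).foldl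
      (fun (st : Int × Int) i =>
        if PySem.Str.len (PySem.List.pyGetD xs i "") > st.1 then
          (PySem.Str.len (PySem.List.pyGetD xs i ""), i)
        else if PySem.Str.len (PySem.List.pyGetD xs i "") = st.1 then
          if PySem.List.pyGetD xs i "" < PySem.List.pyGetD xs st.2 "" then
            (st.1, i)
          else st
        else st) (0, 0)
    0 ≤ st.2 ∧ st.2 < (m : Int) ∧ st.1 = PySem.Str.len (PySem.List.pyGetD xs st.2 "") ∧
      ∀ j : Nat, j < m → pkey (PySem.List.pyGetD xs st.2 "") ≤ pkey (PySem.List.pyGetD xs (j : Int) "") := by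
  induction m with
  | zero => omega
  | succ k ih =>
    intro st
    by_cases hk : 1 ≤ k
    · -- split off the last index k
      have hsp : PySem.List.pyRange 0 ((k : Int) + 1) 1 = PySem.List.pyRange 0 (k : Int) 1 ++ [(k : Int)] :=
        PySem.List.pyRange_one_succ_right (by omega)
      obtain ⟨ih0, ih1, ih2, ih3⟩ := ih hk (by omega)
      set stk := (PySem.List.pyRange 0 (k : Int) 1).foldl
        (fun (st : Int × Int) i =>
          if PySem.Str.len (PySem.List.pyGetD xs i "") > st.1 then
            (PySem.Str.len (PySem.List.pyGetD xs i ""), i)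
          else if PySem.Str.len (PySem.List.pyGetD xs i "") = st.1 then
            if PySem.List.pyGetD xs i "" < PySem.List.pyGetD xs st.2 "" then
              (st.1, i)
            else st
          else st) (0, 0) with hstk
      have hst : st = (fun (st : Int × Int) i =>
          if PySem.Str.len (PySem.List.pyGetD xs i "") > st.1 then
            (PySem.Str.len (PySem.List.pyGetD xs i ""), i)
          else if PySem.Str.len (PySem.List.pyGetD xs i "") = st.1 then
            if PySem.List.pyGetD xs i "" < PySem.List.pyGetD xs st.2 "" then
              (st.1, i)
            else st
          else st) stk (k : Int) := by
        show ((PySem.List.pyRange 0 ((k : Nat) + 1 : Nat) 1).foldl _ (0,0)) = _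
        rw [show (((k : Nat) + 1 : Nat) : Int) = (k : Int) + 1 by push_cast; ring, hsp,
          List.foldl_append]
        simp [hstk]
      set c := PySem.List.pyGetD xs stk.2 "" with hc
      set s := PySem.List.pyGetD xs (k : Int) "" with hs
      by_cases hgt : PySem.Str.len s > stk.1
      · have hstv : st = (PySem.Str.len s, (k : Int)) := by
          rw [hst]; beta_reduce; rw [if_pos hgt]
        refine ⟨by rw [hstv]; omega, by rw [hstv]; omega, by rw [hstv], ?_⟩
        intro j hj
        rw [hstv]
        simp only
        by_cases hjk : j < k
        · have h4 := ih3 j hjk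
          have : pkey s < pkey c := by
            rw [pkey_lt_iff]; left; omega
          exact le_trans (le_of_lt this) h4
        · have : j = k := by omega
          subst this; exact le_refl _
      · by_cases heq : PySem.Str.len s = stk.1
        · by_cases hlt : s < c
          · have hstv : st = (stk.1, (k : Int)) := by
              rw [hst]; beta_reduce; rw [if_neg hgt, if_pos heq, if_pos hlt]
            refine ⟨by rw [hstv]; omega, by rw [hstv]; omega, by rw [hstv]; exact heq.symm, ?_⟩
            intro j hj
            rw [hstv]
            simp only
            by_cases hjk : j < k
            · have h4 := ih3 j hjk
              have : pkey s < pkey c := by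
                rw [pkey_lt_iff]; right; exact ⟨by omega, hlt⟩
              exact le_trans (le_of_lt this) h4
            · have : j = k := by omega
              subst this; exact le_refl _
          · have hstv : st = stk := by
              rw [hst]; beta_reduce; rw [if_neg hgt, if_pos heq, if_neg hlt]
            refine ⟨by rw [hstv]; omega, by rw [hstv]; omega, by rw [hstv]; exact ih2, ?_⟩
            intro j hj
            rw [hstv]
            by_cases hjk : j < k
            · exact ih3 j hjk
            · have hjke : j = k := by omega
              subst hjke
              rw [← hc, ← hs]
              rw [pkey_le_iff]
              rintro (hl | ⟨hl, hl2⟩)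
              · omega
              · exact hlt hl2
        · -- len s < stk.1 : keep
          have hstv : st = stk := by
            rw [hst]; beta_reduce; rw [if_neg hgt, if_neg heq]
          refine ⟨by rw [hstv]; omega, by rw [hstv]; omega, by rw [hstv]; exact ih2, ?_⟩
          intro j hj
          rw [hstv]
          by_cases hjk : j < k
          · exact ih3 j hjk
          · have hjke : j = k := by omega
            subst hjke
            rw [← hc, ← hs]
            have : pkey c < pkey s := by
              rw [pkey_lt_iff]; left; omega
            exact le_of_lt this
    · -- k = 0, m = 1 : base case
      have hk0 : k = 0 := by omega
      subst hk0
      have hr : PySem.List.pyRange 0 ((0 : Nat) + 1 : Nat) 1 = [(0 : Int)] := by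
        simpa using PySem.List.pyRange_one_singleton (a := 0)
      have hlen0 : 0 ≤ PySem.Str.len (PySem.List.pyGetD xs (0 : Int) "") := by
        rw [PySem.Str.len_eq]; positivity
      have hstv : st = (PySem.Str.len (PySem.List.pyGetD xs (0 : Int) ""), 0) := by
        show ((PySem.List.pyRange 0 ((0 : Nat) + 1 : Nat) 1).foldl _ (0,0)) = _
        rw [hr]
        simp only [List.foldl_cons, List.foldl_nil]
        by_cases hgt : PySem.Str.len (PySem.List.pyGetD xs (0 : Int) "") > 0
        · rw [if_pos hgt]
        · have he : PySem.Str.len (PySem.List.pyGetD xs (0 : Int) "") = 0 := by omega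
          rw [if_neg hgt, if_pos he, if_neg (lt_irrefl _), he]
      refine ⟨by rw [hstv], by rw [hstv]; omega, by rw [hstv], ?_⟩
      intro j hj
      have : j = 0 := by omega
      subst this
      rw [hstv]
      exact le_refl _

theorem A_min (xs : List String) (hne : xs ≠ []) :
    my_find xs ∈ xs ∧ ∀ y ∈ xs, pkey (my_find xs) ≤ pkey y := by
  have hlen : 1 ≤ xs.length := List.length_pos_iff.mpr hne
  obtain ⟨h0, h1, _, h3⟩ := A_loop xs xs.length hlen (le_refl _)
  have hA : my_find xs = PySem.List.pyGetD xs
      ((PySem.List.pyRange 0 (xs.length : Int) 1).foldl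
        (fun (st : Int × Int) i =>
          if PySem.Str.len (PySem.List.pyGetD xs i "") > st.1 then
            (PySem.Str.len (PySem.List.pyGetD xs i ""), i)
          else if PySem.Str.len (PySem.List.pyGetD xs i "") = st.1 then
            if PySem.List.pyGetD xs i "" < PySem.List.pyGetD xs st.2 "" then
              (st.1, i)
            else st
          else st) (0, 0)).2 "" := by
    simp [my_find, PySem.List.len]
  constructor
  · rw [hA]
    exact PySem.List.pyGetD_mem xs "" ⟨by omega, h1⟩
  · intro y hy
    rw [hA]
    obtain ⟨j, hj, rfl⟩ := List.mem_iff_getElem.mp hy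
    have := h3 j hj
    have hget : PySem.List.pyGetD xs (j : Int) "" = xs[j] := by
      rw [PySem.List.pyGetD_eq_getElem (i := (j : Int)) xs "" (by omega) (by exact_mod_cast hj)]
      simp
    rwa [hget] at this

-- ===== VERDICT (by name: the statement is the Claim_ definition above) =====
theorem my_find_spec : Claim_equal_my_find := by
  intro xs _ hpre
  unfold Spec_my_find
  obtain ⟨hAmem, hAmin⟩ := A_min xs hpre
  obtain ⟨hBmem, hBmin⟩ := B_min xs hpre
  exact pkey_inj (le_antisymm (hAmin _ hBmem) (hBmin _ hAmem))
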